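-- pv_equiv track=rewrite | github.com/MohammedAffan75/Startify_AI | backend/app/generator_agent.py | _filter_and_score_text
-- ===== SOURCE A (Python) =====
-- from typing import Dict, Any, List
--
-- def _filter_and_score_text(texts: List[str], min_words: int = 3, max_words: int = 15) -> List[str]:
--     """Filter and score text snippets."""
--     # Remove duplicates
--     unique_texts = list(set(texts))
--
--     scored_texts = []
--     for text in unique_texts:
--         word_count = len(text.split())
--
--         # Filter by word count
--         if min_words <= word_count <= max_words:
--             score = 10 - abs(word_count - (min_words + max_words) // 2)
--             scored_texts.append((text, score))
--
--     # Sort by score descending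
--     scored_texts.sort(key=lambda x: x[1], reverse=True)
--
--     return [text for text, score in scored_texts]
-- ===== SOURCE B (Python) =====
-- def _filter_and_score_text(texts, min_words=3, max_words=15):
--     """Filter and score text snippets (group-by-score table + descending key walk)."""
--     unique_texts = list(dict.fromkeys(texts))
--     mid = (min_words + max_words) // 2
--     groups = {}
--     for text in unique_texts:
--         wc = len(text.split())
--         if min_words <= wc <= max_words:
--             score = 10 - abs(wc - mid)
--             groups[score] = groups.get(score, []) + [text]
--     result = []
--     for score in sorted(groups, reverse=True):
--         result.extend(groups[score])
--     return result
-- ===== Notes on version B (the rewrite author's own statement) =====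
-- stated objective: alternative
-- what changed: B deduplicates by first occurrence (dict.fromkeys) and replaces A's stable descending sort of (text, score) tuples with a group-by-score table built in one pass, then emits the buckets while walking the distinct scores in descending order.
-- outside the precondition, e.g. on _filter_and_score_text(['a b c', 'd e f'], 3, 15): A returns ['a b c', 'd e f'], B returns ['a b c', 'd e f']
import Mathlib
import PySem

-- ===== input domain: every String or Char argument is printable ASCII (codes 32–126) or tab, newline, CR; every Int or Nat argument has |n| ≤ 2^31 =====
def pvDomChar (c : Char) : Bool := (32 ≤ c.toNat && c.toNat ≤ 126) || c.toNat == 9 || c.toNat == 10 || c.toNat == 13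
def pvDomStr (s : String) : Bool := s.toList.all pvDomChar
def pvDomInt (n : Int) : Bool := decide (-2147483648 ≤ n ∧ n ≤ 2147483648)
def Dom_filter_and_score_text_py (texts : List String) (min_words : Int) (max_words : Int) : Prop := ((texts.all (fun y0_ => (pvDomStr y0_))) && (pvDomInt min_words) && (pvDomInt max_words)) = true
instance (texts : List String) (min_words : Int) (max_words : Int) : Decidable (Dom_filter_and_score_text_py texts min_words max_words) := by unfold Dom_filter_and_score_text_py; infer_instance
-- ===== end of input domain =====

-- B groups kept texts into a score-keyed table and walks the distinct scores in descending order,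
-- instead of A's stable sort of (text, score) pairs — objective: alternative (same cost, different algorithm).

-- ===== PORT A =====
def filter_and_score_text_py (texts : List String) (min_words : Int) (max_words : Int) : List String :=
  let unique_texts := PySem.Set.ofList texts
  let scored_texts := unique_texts.foldl (fun scored text =>
      let word_count : Int := ((PySem.Str.split₀ text).length : Int)
      if min_words ≤ word_count ∧ word_count ≤ max_words then
        scored ++ [(text, 10 - (((word_count - PySem.Int.floordiv (min_words + max_words) 2).natAbs : Int)))]
      else scored) []
  (PySem.List.sorted scored_texts (fun x => x.2) true).map (fun x => x.1)

-- ===== PORT B =====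
def filter_and_score_text_py_alt (texts : List String) (min_words : Int) (max_words : Int) : List String :=
  let unique_texts := PySem.List.dedup texts
  let mid := PySem.Int.floordiv (min_words + max_words) 2
  let groups := unique_texts.foldl (fun (groups : PySem.Dict Int (List String)) text =>
      let wc : Int := ((PySem.Str.split₀ text).length : Int)
      if min_words ≤ wc ∧ wc ≤ max_words then
        groups.modify (10 - (((wc - mid).natAbs : Int))) [] (fun g => g ++ [text])
      else groups) PySem.Dict.empty
  (PySem.List.sorted groups.keys (fun s => s) true).foldl (fun result s => result ++ groups.getD s []) []

-- ===== PRECONDITION & SPEC =====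
def pvWC (t : String) : Int := ((PySem.Str.split₀ t).length : Int)
def pvKeep (mn mx : Int) (t : String) : Bool := decide (mn ≤ pvWC t ∧ pvWC t ≤ mx)
def pvSKey (mn mx : Int) (t : String) : Int := ((pvWC t - PySem.Int.floordiv (mn + mx) 2).natAbs : Int)

-- Pre_ excludes lists containing two DISTINCT texts that both pass the word-count filter and receive EQUAL scores:
-- A orders such score ties by Python's set-hash iteration order, which is accidental (hash-seed dependent); on tie-free
-- inputs A's descending sort output is uniquely determined and B reproduces it exactly.
def Pre_filter_and_score_text_py (texts : List String) (min_words : Int) (max_words : Int) : Prop :=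
  List.Pairwise (fun a b => a = b ∨ pvKeep min_words max_words a = false ∨ pvKeep min_words max_words b = false ∨
    pvSKey min_words max_words a ≠ pvSKey min_words max_words b) texts
instance (texts : List String) (min_words : Int) (max_words : Int) : Decidable (Pre_filter_and_score_text_py texts min_words max_words) := by unfold Pre_filter_and_score_text_py; infer_instance

def pvWitness_filter_and_score_text_py : List String × Int × Int := (["one two three four", "a b c d e"], 3, 15)

def Spec_filter_and_score_text_py (texts : List String) (min_words : Int) (max_words : Int) (out : List String) : Prop := out = filter_and_score_text_py_alt texts min_words max_words
instance (texts : List String) (min_words : Int) (max_words : Int) (out : List String) : Decidable (Spec_filter_and_score_text_py texts min_words max_words out) := by unfold Spec_filter_and_score_text_py; infer_instance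

-- ===== CLAIM (what is proved, stated in full; the proofs are below) =====
def Claim_equal_filter_and_score_text_py : Prop := ∀ (texts : List String) (min_words : Int) (max_words : Int), Dom_filter_and_score_text_py texts min_words max_words → Pre_filter_and_score_text_py texts min_words max_words → Spec_filter_and_score_text_py texts min_words max_words (filter_and_score_text_py texts min_words max_words)

-- ===== LEMMAS AND PROOFS =====

-- the score both programs assign to a kept text
def pvKey (mn mx : Int) (t : String) : Int := 10 - pvSKey mn mx t
-- the kept unique texts, in set(texts) (= first-occurrence) order
def pvM (texts : List String) (mn mx : Int) : List String :=
  (PySem.Set.ofList texts).filter (pvKeep mn mx)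

-- a foldl whose body is guarded by `if p x` is the unguarded foldl over the filtered list
theorem pv_foldl_if {α σ : Type} (p : α → Bool) (f : σ → α → σ) :
    ∀ (l : List α) (s : σ), l.foldl (fun s x => if p x then f s x else s) s
      = (l.filter p).foldl f s := by
  intro l
  induction l with
  | nil => intro s; rfl
  | cons x l ih => intro s; by_cases h : p x <;> simp [h, ih]

-- A's accumulation loop builds exactly the kept texts paired with their scores
theorem pvA_scored (texts : List String) (mn mx : Int) :
    (PySem.Set.ofList texts).foldl (fun scored text =>
        if mn ≤ ((PySem.Str.split₀ text).length : Int) ∧ ((PySem.Str.split₀ text).length : Int) ≤ mx then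
          scored ++ [(text, 10 - (((((PySem.Str.split₀ text).length : Int) - PySem.Int.floordiv (mn + mx) 2).natAbs : Int)))]
        else scored) ([] : List (String × Int))
      = (pvM texts mn mx).map (fun t => (t, pvKey mn mx t)) := by
  have hstep : (fun (scored : List (String × Int)) text =>
        if mn ≤ ((PySem.Str.split₀ text).length : Int) ∧ ((PySem.Str.split₀ text).length : Int) ≤ mx then
          scored ++ [(text, 10 - (((((PySem.Str.split₀ text).length : Int) - PySem.Int.floordiv (mn + mx) 2).natAbs : Int)))]
        else scored)
      = (fun scored text => if pvKeep mn mx text then scored ++ [(text, pvKey mn mx text)] else scored) := by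
    funext scored text
    by_cases h : mn ≤ ((PySem.Str.split₀ text).length : Int) ∧ ((PySem.Str.split₀ text).length : Int) ≤ mx <;>
      simp [pvKeep, pvKey, pvSKey, pvWC, h]
  rw [hstep, pv_foldl_if (pvKeep mn mx) (fun scored text => scored ++ [(text, pvKey mn mx text)]),
    PySem.List.foldl_append_singleton_eq_map]
  rfl

-- B's grouping step, rewritten through pvKeep/pvKey
theorem pvB_step (mn mx : Int) :
    (fun (d : PySem.Dict Int (List String)) text =>
        if mn ≤ ((PySem.Str.split₀ text).length : Int) ∧ ((PySem.Str.split₀ text).length : Int) ≤ mx then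
          d.modify (10 - (((((PySem.Str.split₀ text).length : Int) - PySem.Int.floordiv (mn + mx) 2).natAbs : Int))) [] (fun g => g ++ [text])
        else d)
      = (fun (d : PySem.Dict Int (List String)) text =>
          if pvKeep mn mx text then d.modify (pvKey mn mx text) [] (fun g => g ++ [text]) else d) := by
  funext d text
  by_cases h : mn ≤ ((PySem.Str.split₀ text).length : Int) ∧ ((PySem.Str.split₀ text).length : Int) ≤ mx <;>
    simp [pvKeep, pvKey, pvSKey, pvWC, h]

-- B's grouping loop: the bucket of score k holds exactly the kept texts of score k, in order
theorem pvB_getD (texts : List String) (mn mx : Int) (k : Int) :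
    ((PySem.Set.ofList texts).foldl (fun (d : PySem.Dict Int (List String)) text =>
        if mn ≤ ((PySem.Str.split₀ text).length : Int) ∧ ((PySem.Str.split₀ text).length : Int) ≤ mx then
          d.modify (10 - (((((PySem.Str.split₀ text).length : Int) - PySem.Int.floordiv (mn + mx) 2).natAbs : Int))) [] (fun g => g ++ [text])
        else d) PySem.Dict.empty).getD k []
      = (pvM texts mn mx).filter (fun t => pvKey mn mx t == k) := by
  rw [pvB_step mn mx, pv_foldl_if (pvKeep mn mx)
    (fun (d : PySem.Dict Int (List String)) text => d.modify (pvKey mn mx text) [] (fun g => g ++ [text]))]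
  have hMM : pvM texts mn mx = List.filter (pvKeep mn mx) (PySem.Set.ofList texts) := rfl
  rw [← hMM]
  rw [show ((pvM texts mn mx).foldl
        (fun (d : PySem.Dict Int (List String)) text => d.modify (pvKey mn mx text) [] (fun g => g ++ [text]))
        PySem.Dict.empty)
      = (((pvM texts mn mx).map (fun t => (pvKey mn mx t, t))).foldl
        (fun (d : PySem.Dict Int (List String)) p => d.modify p.1 [] (fun g => g ++ [p.2]))
        PySem.Dict.empty) from (List.foldl_map (f := fun t => (pvKey mn mx t, t)) (g := fun (d : PySem.Dict Int (List String)) p => d.modify p.1 [] (fun g => g ++ [p.2]))).symm]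
  rw [PySem.Dict.getD_foldl_modify_append]
  simp [List.filter_map, Function.comp_def]

-- B's table has exactly the distinct occurring scores as keys, in first-occurrence order
theorem pvB_keys (texts : List String) (mn mx : Int) :
    ((PySem.Set.ofList texts).foldl (fun (d : PySem.Dict Int (List String)) text =>
        if mn ≤ ((PySem.Str.split₀ text).length : Int) ∧ ((PySem.Str.split₀ text).length : Int) ≤ mx then
          d.modify (10 - (((((PySem.Str.split₀ text).length : Int) - PySem.Int.floordiv (mn + mx) 2).natAbs : Int))) [] (fun g => g ++ [text])
        else d) PySem.Dict.empty).keys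
      = PySem.Set.ofList ((pvM texts mn mx).map (fun t => pvKey mn mx t)) := by
  rw [pvB_step mn mx, pv_foldl_if (pvKeep mn mx)
    (fun (d : PySem.Dict Int (List String)) text => d.modify (pvKey mn mx text) [] (fun g => g ++ [text]))]
  have hMM : pvM texts mn mx = List.filter (pvKeep mn mx) (PySem.Set.ofList texts) := rfl
  rw [← hMM]
  rw [PySem.Dict.keys_foldl_modify_key (pvM texts mn mx) (fun t => pvKey mn mx t) [] (fun _ t g => g ++ [t])]
  rw [PySem.Dict.keys_empty, PySem.Set.update_nil_left]

-- distinct keys covering a list partition it: concatenating the per-key filters is a permutation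
theorem pv_flatMap_filter_perm {β : Type} [DecidableEq β] :
    ∀ (ks : List β) (xs : List (String × β)), ks.Nodup → (∀ p ∈ xs, p.2 ∈ ks) →
      (ks.flatMap (fun s => xs.filter (fun p => p.2 == s))).Perm xs := by
  intro ks
  induction ks with
  | nil =>
    intro xs _ hcov
    cases xs with
    | nil => simp
    | cons p xs => exact absurd (hcov p (by simp)) (by simp)
  | cons k ks ih =>
    intro xs hnd hcov
    rw [List.flatMap_cons]
    have hk : k ∉ ks := (List.nodup_cons.mp hnd).1
    have htail : ks.flatMap (fun s => xs.filter (fun p => p.2 == s))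
        = ks.flatMap (fun s => (xs.filter (fun p => !(p.2 == k))).filter (fun p => p.2 == s)) := by
      apply List.flatMap_congr
      intro s hs
      rw [List.filter_filter]
      apply List.filter_congr
      intro p _
      by_cases hpk : p.2 = k
      · subst hpk
        have : p.2 ≠ s := fun h => hk (h ▸ hs)
        simp [this]
      · simp [hpk]
    rw [htail]
    have hperm : (ks.flatMap (fun s => (xs.filter (fun p => !(p.2 == k))).filter (fun p => p.2 == s))).Perm
        (xs.filter (fun p => !(p.2 == k))) := by
      apply ih _ (List.nodup_cons.mp hnd).2
      intro p hp
      have hmem := List.mem_filter.mp hp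
      have := hcov p hmem.1
      simp at hmem
      simp at this
      rcases this with h | h
      · exact absurd h hmem.2
      · exact h
    exact (hperm.append_left _).trans (List.filter_append_perm _ xs)

-- under Pre_, the kept unique texts have pairwise distinct scores
theorem pvM_pairwise_key_ne (texts : List String) (mn mx : Int)
    (hpre : Pre_filter_and_score_text_py texts mn mx) :
    (pvM texts mn mx).Pairwise (fun a b => pvKey mn mx a ≠ pvKey mn mx b) := by
  have hnd : (pvM texts mn mx).Nodup := (PySem.Set.nodup_ofList texts).filter _
  have hsym : Symmetric (fun a b : String => a = b ∨ pvKeep mn mx a = false ∨ pvKeep mn mx b = false ∨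
      pvSKey mn mx a ≠ pvSKey mn mx b) := by
    intro a b h
    rcases h with h | h | h | h
    · exact Or.inl h.symm
    · exact Or.inr (Or.inr (Or.inl h))
    · exact Or.inr (Or.inl h)
    · exact Or.inr (Or.inr (Or.inr (Ne.symm h)))
  have hall := hpre.forall hsym
  refine hnd.imp_of_mem ?_
  intro a b ha hb hne
  have haT : a ∈ texts := (PySem.Set.mem_ofList texts a).mp (List.mem_filter.mp ha).1
  have hbT : b ∈ texts := (PySem.Set.mem_ofList texts b).mp (List.mem_filter.mp hb).1
  have haK : pvKeep mn mx a = true := (List.mem_filter.mp ha).2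
  have hbK : pvKeep mn mx b = true := (List.mem_filter.mp hb).2
  rcases hall haT hbT hne with h | h | h | h
  · exact absurd h hne
  · rw [haK] at h; exact absurd h (by simp)
  · rw [hbK] at h; exact absurd h (by simp)
  · unfold pvKey; omega

-- main equivalence, stated on the unfolded ports
theorem pv_main (texts : List String) (mn mx : Int)
    (hpre : Pre_filter_and_score_text_py texts mn mx) :
    filter_and_score_text_py texts mn mx = filter_and_score_text_py_alt texts mn mx := by
  simp only [filter_and_score_text_py, filter_and_score_text_py_alt,
    PySem.List.dedup_eq_ofList]
  rw [pvA_scored texts mn mx, pvB_keys texts mn mx]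
  set m := pvM texts mn mx with hm
  set key := pvKey mn mx with hkey
  set kp := m.map (fun t => (t, key t)) with hkp
  set K := PySem.List.sorted (PySem.Set.ofList (m.map (fun t => key t))) (fun s => s) true with hK
  rw [PySem.List.foldl_append_eq_flatMap (fun s => PySem.Dict.getD _ s []) K []]
  rw [List.flatMap_congr (fun s _ => pvB_getD texts mn mx s)]
  have hbucket : ∀ s : Int, m.filter (fun t => key t == s) = (kp.filter (fun p => p.2 == s)).map (fun p => p.1) := by
    intro s
    rw [hkp, List.filter_map]
    simp [Function.comp_def]
  rw [List.flatMap_congr (fun s _ => hbucket s)]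
  rw [← List.map_flatMap]
  set ys := K.flatMap (fun s => kp.filter (fun p => p.2 == s)) with hys
  have hKperm : K.Perm (PySem.Set.ofList (m.map (fun t => key t))) := PySem.List.sorted_perm _ _ _
  have hKnd : K.Nodup := hKperm.nodup_iff.mpr (PySem.Set.nodup_ofList _)
  have hKdesc : K.Pairwise (fun a b => b < a) := by
    have h1 : K.Pairwise (fun a b : Int => b ≤ a) := PySem.List.sorted_pairwise_rev _ _
    exact (h1.and hKnd).imp (fun h => lt_of_le_of_ne h.1 (Ne.symm h.2))
  have hysperm : ys.Perm kp := by
    apply pv_flatMap_filter_perm K kp hKnd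
    intro p hp
    rw [hkp] at hp
    rcases List.mem_map.mp hp with ⟨t, ht, rfl⟩
    exact hKperm.mem_iff.mpr ((PySem.Set.mem_ofList _ _).mpr (List.mem_map.mpr ⟨t, ht, rfl⟩))
  have hkpne : kp.Pairwise (fun a b : String × Int => a.2 ≠ b.2) := by
    rw [hkp, List.pairwise_map]
    exact pvM_pairwise_key_ne texts mn mx hpre
  have hysdesc : ys.Pairwise (fun a b : String × Int => b.2 < a.2) := by
    rw [hys, List.pairwise_flatMap]
    constructor
    · intro s _
      refine (hkpne.filter _).imp_of_mem ?_
      intro a b ha hb hne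
      have ha2 : a.2 = s := by simpa using (List.mem_filter.mp ha).2
      have hb2 : b.2 = s := by simpa using (List.mem_filter.mp hb).2
      exact absurd (ha2.trans hb2.symm) hne
    · refine hKdesc.imp_of_mem ?_
      intro a b _ _ hba x hx y hy
      have hx2 : x.2 = a := by simpa using (List.mem_filter.mp hx).2
      have hy2 : y.2 = b := by simpa using (List.mem_filter.mp hy).2
      rw [hx2, hy2]; exact hba
  rw [PySem.List.sorted_rev_eq_of_perm_of_pairwise_gt kp ys (fun x => x.2) hysperm hysdesc]
  simp

-- ===== VERDICT (by name: the statement is the Claim_ definition above) =====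
theorem filter_and_score_text_py_spec : Claim_equal_filter_and_score_text_py := by
  intro texts mn mx _ hpre
  unfold Spec_filter_and_score_text_py
  exact pv_main texts mn mx hpre
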